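-- pv_equiv track=rewrite | github.com/VicoTriansyahNasril/TalentaTalk-Dev-Preview | Backend_TalentaTalk/TalentaTalkBackend/view/PhonemeRecognitionView.py | get_alignment_statistics
-- ===== SOURCE A (Python) =====
-- from typing import Dict, List, Optional
--
-- def get_alignment_statistics(alignment: List[Dict]) -> Dict:
--     """Get detailed statistics from alignment"""
--     stats = {
--         "total_phonemes_target": 0,
--         "total_phonemes_user": 0,
--         "correct_phonemes": 0,
--         "similar_phonemes": 0,
--         "incorrect_phonemes": 0,
--         "missing_phonemes": 0,
--         "extra_phonemes": 0
--     }
--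
--     for phoneme_comparison in alignment:
--         status = phoneme_comparison.get("status", "incorrect")
--         target = phoneme_comparison.get("target", "")
--         user = phoneme_comparison.get("user", "")
--
--         if target:
--             stats["total_phonemes_target"] += 1
--         if user:
--             stats["total_phonemes_user"] += 1
--
--         if status == "correct":
--             stats["correct_phonemes"] += 1
--         elif status == "similar":
--             stats["similar_phonemes"] += 1
--         elif status == "incorrect":
--             stats["incorrect_phonemes"] += 1
--         elif status == "missing":
--             stats["missing_phonemes"] += 1
--         elif status == "extra":
--             stats["extra_phonemes"] += 1
--
--     return stats
-- ===== SOURCE B (Python) =====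
-- def get_alignment_statistics(alignment):
--     """Get detailed statistics from alignment: prebuilt status frequency table + shaped reads."""
--     counts = {}
--     for p in alignment:
--         s = p.get("status", "incorrect")
--         counts[s] = counts.get(s, 0) + 1
--     return {
--         "total_phonemes_target": sum(1 for p in alignment if p.get("target", "")),
--         "total_phonemes_user": sum(1 for p in alignment if p.get("user", "")),
--         "correct_phonemes": counts.get("correct", 0),
--         "similar_phonemes": counts.get("similar", 0),
--         "incorrect_phonemes": counts.get("incorrect", 0),
--         "missing_phonemes": counts.get("missing", 0),
--         "extra_phonemes": counts.get("extra", 0),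
--     }
-- ===== Notes on version B (the rewrite author's own statement) =====
-- stated objective: alternative
-- what changed: A's single fused loop with cascading if/elif branches mutating a stats dict is replaced by a prebuilt status frequency table (one counting pass) plus separate countP-style passes for target/user totals, with the result assembled by keyed reads from the table.
import Mathlib
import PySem

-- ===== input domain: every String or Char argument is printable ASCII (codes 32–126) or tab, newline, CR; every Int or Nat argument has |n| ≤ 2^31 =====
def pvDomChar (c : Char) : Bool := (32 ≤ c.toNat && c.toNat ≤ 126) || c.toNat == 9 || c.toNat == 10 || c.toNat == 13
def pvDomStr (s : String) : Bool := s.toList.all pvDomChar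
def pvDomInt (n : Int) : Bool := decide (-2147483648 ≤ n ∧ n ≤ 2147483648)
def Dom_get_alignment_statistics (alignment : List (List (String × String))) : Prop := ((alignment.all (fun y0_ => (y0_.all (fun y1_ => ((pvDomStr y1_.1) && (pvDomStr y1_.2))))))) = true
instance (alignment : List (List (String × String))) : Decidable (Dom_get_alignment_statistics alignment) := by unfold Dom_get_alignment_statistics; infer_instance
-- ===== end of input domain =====

-- B replaces A's fused cascading-branch loop by a prebuilt status frequency table plus
-- separate counting passes and keyed reads (alternative decomposition, same cost).

-- shared helper: p.get(k, dflt) on an association-list dict (first match)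
def pvGet (p : List (String × String)) (k dflt : String) : String :=
  (PySem.Dict.mk p).getD k dflt

-- ===== PORT A =====
-- literal transliteration of A: a stats dict initialised to zeros, one loop updating it.
-- ('stats[k] += 1' is ported as Dict.modify k 0 (· + 1); the key is always present, so the
-- default 0 is never consulted and no KeyError can occur.)
def get_alignment_statistics (alignment : List (List (String × String))) : List (String × Int) :=
  let stats : PySem.Dict String Int := PySem.Dict.ofList
    [("total_phonemes_target", 0), ("total_phonemes_user", 0), ("correct_phonemes", 0),
     ("similar_phonemes", 0), ("incorrect_phonemes", 0), ("missing_phonemes", 0),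
     ("extra_phonemes", 0)]
  let stats := alignment.foldl (fun stats pc =>
    let status := pvGet pc "status" "incorrect"
    let target := pvGet pc "target" ""
    let user := pvGet pc "user" ""
    let stats := if target ≠ "" then stats.modify "total_phonemes_target" 0 (· + 1) else stats
    let stats := if user ≠ "" then stats.modify "total_phonemes_user" 0 (· + 1) else stats
    if status == "correct" then stats.modify "correct_phonemes" 0 (· + 1)
    else if status == "similar" then stats.modify "similar_phonemes" 0 (· + 1)
    else if status == "incorrect" then stats.modify "incorrect_phonemes" 0 (· + 1)
    else if status == "missing" then stats.modify "missing_phonemes" 0 (· + 1)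
    else if status == "extra" then stats.modify "extra_phonemes" 0 (· + 1)
    else stats) stats
  stats.items

-- ===== PORT B =====
-- literal transliteration of B: build the status frequency table, then assemble the result
-- from keyed reads and two separate counting passes (sum(1 for …) = countP).
def get_alignment_statistics_alt (alignment : List (List (String × String))) : List (String × Int) :=
  let counts : PySem.Dict String Int := alignment.foldl (fun d p =>
    let s := pvGet p "status" "incorrect"
    d.insert s (d.getD s 0 + 1)) PySem.Dict.empty
  [("total_phonemes_target", (alignment.countP (fun p => pvGet p "target" "" ≠ "") : Int)),
   ("total_phonemes_user", (alignment.countP (fun p => pvGet p "user" "" ≠ "") : Int)),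
   ("correct_phonemes", counts.getD "correct" 0),
   ("similar_phonemes", counts.getD "similar" 0),
   ("incorrect_phonemes", counts.getD "incorrect" 0),
   ("missing_phonemes", counts.getD "missing" 0),
   ("extra_phonemes", counts.getD "extra" 0)]

-- ===== PRECONDITION & SPEC =====
def Spec_get_alignment_statistics (alignment : List (List (String × String))) (out : List (String × Int)) : Prop := out = get_alignment_statistics_alt alignment
instance (alignment : List (List (String × String))) (out : List (String × Int)) : Decidable (Spec_get_alignment_statistics alignment out) := by unfold Spec_get_alignment_statistics; infer_instance

-- ===== CLAIM (what is proved, stated in full; the proofs are below) =====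
def Claim_equal_get_alignment_statistics : Prop := ∀ (alignment : List (List (String × String))), Dom_get_alignment_statistics alignment → Spec_get_alignment_statistics alignment (get_alignment_statistics alignment)

-- ===== LEMMAS AND PROOFS =====

-- the shape of A's stats dict: its seven keys, with symbolic counter values
def pvStats (t u c s i m e : Int) : PySem.Dict String Int :=
  PySem.Dict.mk
    [("total_phonemes_target", t), ("total_phonemes_user", u), ("correct_phonemes", c),
     ("similar_phonemes", s), ("incorrect_phonemes", i), ("missing_phonemes", m),
     ("extra_phonemes", e)]

-- the loop body of A's port (defeq to the lambda in the port), named so the invariant can be stated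
def pvStepA (stats : PySem.Dict String Int) (pc : List (String × String)) : PySem.Dict String Int :=
  let status := pvGet pc "status" "incorrect"
  let target := pvGet pc "target" ""
  let user := pvGet pc "user" ""
  let stats := if target ≠ "" then stats.modify "total_phonemes_target" 0 (· + 1) else stats
  let stats := if user ≠ "" then stats.modify "total_phonemes_user" 0 (· + 1) else stats
  if status == "correct" then stats.modify "correct_phonemes" 0 (· + 1)
  else if status == "similar" then stats.modify "similar_phonemes" 0 (· + 1)
  else if status == "incorrect" then stats.modify "incorrect_phonemes" 0 (· + 1)
  else if status == "missing" then stats.modify "missing_phonemes" 0 (· + 1)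
  else if status == "extra" then stats.modify "extra_phonemes" 0 (· + 1)
  else stats

lemma pvStats_modify_tt (t u c s i m e : Int) :
    (pvStats t u c s i m e).modify "total_phonemes_target" 0 (· + 1) = pvStats (t + 1) u c s i m e := by
  simp [pvStats, PySem.Dict.modify, PySem.Dict.contains, PySem.Dict.getD, PySem.Dict.get?, PySem.Dict.insert]

lemma pvStats_modify_tu (t u c s i m e : Int) :
    (pvStats t u c s i m e).modify "total_phonemes_user" 0 (· + 1) = pvStats t (u + 1) c s i m e := by
  simp [pvStats, PySem.Dict.modify, PySem.Dict.contains, PySem.Dict.getD, PySem.Dict.get?, PySem.Dict.insert]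

lemma pvStats_modify_c (t u c s i m e : Int) :
    (pvStats t u c s i m e).modify "correct_phonemes" 0 (· + 1) = pvStats t u (c + 1) s i m e := by
  simp [pvStats, PySem.Dict.modify, PySem.Dict.contains, PySem.Dict.getD, PySem.Dict.get?, PySem.Dict.insert]

lemma pvStats_modify_s (t u c s i m e : Int) :
    (pvStats t u c s i m e).modify "similar_phonemes" 0 (· + 1) = pvStats t u c (s + 1) i m e := by
  simp [pvStats, PySem.Dict.modify, PySem.Dict.contains, PySem.Dict.getD, PySem.Dict.get?, PySem.Dict.insert]

lemma pvStats_modify_i (t u c s i m e : Int) :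
    (pvStats t u c s i m e).modify "incorrect_phonemes" 0 (· + 1) = pvStats t u c s (i + 1) m e := by
  simp [pvStats, PySem.Dict.modify, PySem.Dict.contains, PySem.Dict.getD, PySem.Dict.get?, PySem.Dict.insert]

lemma pvStats_modify_m (t u c s i m e : Int) :
    (pvStats t u c s i m e).modify "missing_phonemes" 0 (· + 1) = pvStats t u c s i (m + 1) e := by
  simp [pvStats, PySem.Dict.modify, PySem.Dict.contains, PySem.Dict.getD, PySem.Dict.get?, PySem.Dict.insert]

lemma pvStats_modify_e (t u c s i m e : Int) :
    (pvStats t u c s i m e).modify "extra_phonemes" 0 (· + 1) = pvStats t u c s i m (e + 1) := by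
  simp [pvStats, PySem.Dict.modify, PySem.Dict.contains, PySem.Dict.getD, PySem.Dict.get?, PySem.Dict.insert]

-- one iteration of A's loop on the symbolic stats dict
set_option maxHeartbeats 1000000 in
lemma pvStepA_stats (hd : List (String × String)) (t u c s i m e : Int) :
    pvStepA (pvStats t u c s i m e) hd =
      pvStats (t + if pvGet hd "target" "" ≠ "" then 1 else 0)
              (u + if pvGet hd "user" "" ≠ "" then 1 else 0)
              (c + if pvGet hd "status" "incorrect" == "correct" then 1 else 0)
              (s + if pvGet hd "status" "incorrect" == "similar" then 1 else 0)
              (i + if pvGet hd "status" "incorrect" == "incorrect" then 1 else 0)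
              (m + if pvGet hd "status" "incorrect" == "missing" then 1 else 0)
              (e + if pvGet hd "status" "incorrect" == "extra" then 1 else 0) := by
  simp only [pvStepA]
  split_ifs <;>
    simp only [pvStats_modify_tt, pvStats_modify_tu, pvStats_modify_c, pvStats_modify_s,
      pvStats_modify_i, pvStats_modify_m, pvStats_modify_e, add_zero] <;>
    simp_all

-- invariant of A's loop: starting from symbolic counters it adds the per-status counts
lemma pvFoldA (l : List (List (String × String))) :
    ∀ (t u c s i m e : Int),
      l.foldl pvStepA (pvStats t u c s i m e) =
        pvStats (t + (l.countP (fun p => pvGet p "target" "" ≠ "") : Int))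
                (u + (l.countP (fun p => pvGet p "user" "" ≠ "") : Int))
                (c + ((l.map (fun p => pvGet p "status" "incorrect")).count "correct" : Int))
                (s + ((l.map (fun p => pvGet p "status" "incorrect")).count "similar" : Int))
                (i + ((l.map (fun p => pvGet p "status" "incorrect")).count "incorrect" : Int))
                (m + ((l.map (fun p => pvGet p "status" "incorrect")).count "missing" : Int))
                (e + ((l.map (fun p => pvGet p "status" "incorrect")).count "extra" : Int)) := by
  induction l with
  | nil => intro t u c s i m e; simp
  | cons hd tl ih =>
    intro t u c s i m e
    rw [List.foldl_cons, pvStepA_stats, ih]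
    simp only [pvStats, PySem.Dict.mk.injEq, List.cons.injEq, Prod.mk.injEq, true_and, and_true,
      List.countP_cons, List.map_cons, List.count_cons]
    refine ⟨?_, ?_, ?_, ?_, ?_, ?_, ?_⟩ <;> push_cast <;> split_ifs <;> simp_all <;> ring

theorem get_alignment_statistics_spec : Claim_equal_get_alignment_statistics := by
  intro alignment _
  show get_alignment_statistics alignment = get_alignment_statistics_alt alignment
  have hA : get_alignment_statistics alignment =
      (alignment.foldl pvStepA (pvStats 0 0 0 0 0 0 0)).items := rfl
  have hB : alignment.foldl (fun d p =>
        let s := pvGet p "status" "incorrect"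
        d.insert s (d.getD s 0 + 1)) (PySem.Dict.empty : PySem.Dict String Int) =
      (alignment.map (fun p => pvGet p "status" "incorrect")).foldl
        (fun d s => d.insert s (d.getD s 0 + 1)) PySem.Dict.empty := by
    rw [List.foldl_map]
  rw [hA, pvFoldA]
  unfold get_alignment_statistics_alt
  rw [hB]
  simp [pvStats, PySem.Dict.getD_foldl_insert_add_one, PySem.Dict.getD_empty]
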